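-- pv_equiv track=rewrite | github.com/jarint/competitive_programming | PS2/B.py | score_check
-- ===== SOURCE A (Python) =====
-- LIMIT = 300
--
-- def score_check(num_probs, first_solve, time_estimates):
--     Num_AC = 0
--     Penalty_Time = 0
--
--     time_remain = 300
--
--     if (time_estimates[first_solve] > LIMIT):
--         return Num_AC, Penalty_Time
--     else:
--         Num_AC += 1
--         Penalty_Time += time_estimates[first_solve]
--         time_remain = time_remain - time_estimates[first_solve]
--         time_estimates.pop(first_solve)
--
--     # sort the time_estimates list
--     time_estimates.sort()
--
--     # now iterate and check how many you can solve
--     current_time = Penalty_Time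
--     for i in range(len(time_estimates)):
--         if (time_estimates[i] <= time_remain):
--             Num_AC += 1
--             Penalty_Time += current_time + time_estimates[i]
--             time_remain = time_remain - time_estimates[i]
--             current_time = current_time + time_estimates[i]
--
--     return Num_AC, Penalty_Time
-- ===== SOURCE B (Python) =====
-- LIMIT = 300
--
-- def score_check(num_probs, first_solve, time_estimates):
--     if time_estimates[first_solve] > LIMIT:
--         return 0, 0
--     t0 = time_estimates.pop(first_solve)
--     time_estimates.sort()
--     rem = 300 - t0
--     # staged passes: build the prefix-sum list, count the prefixes that fit,
--     # then recover the penalty from the slice of fitting prefixes.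
--     prefixes = []
--     s = 0
--     for t in time_estimates:
--         s += t
--         prefixes.append(s)
--     k = sum(1 for p in prefixes if p <= rem)
--     return k + 1, t0 * (k + 1) + sum(prefixes[:k])
-- ===== Notes on version B (the rewrite author's own statement) =====
-- stated objective: alternative
-- what changed: B replaces A's single loop threading (penalty, remaining-time, current-time) state by three staged passes: it materialises the prefix-sum list of the sorted remainder, counts the prefixes that fit in 300-t0 with no conditional loop state, and reconstructs the penalty as t0*(k+1) plus the sum of the fitting prefix slice.
import Mathlib
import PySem

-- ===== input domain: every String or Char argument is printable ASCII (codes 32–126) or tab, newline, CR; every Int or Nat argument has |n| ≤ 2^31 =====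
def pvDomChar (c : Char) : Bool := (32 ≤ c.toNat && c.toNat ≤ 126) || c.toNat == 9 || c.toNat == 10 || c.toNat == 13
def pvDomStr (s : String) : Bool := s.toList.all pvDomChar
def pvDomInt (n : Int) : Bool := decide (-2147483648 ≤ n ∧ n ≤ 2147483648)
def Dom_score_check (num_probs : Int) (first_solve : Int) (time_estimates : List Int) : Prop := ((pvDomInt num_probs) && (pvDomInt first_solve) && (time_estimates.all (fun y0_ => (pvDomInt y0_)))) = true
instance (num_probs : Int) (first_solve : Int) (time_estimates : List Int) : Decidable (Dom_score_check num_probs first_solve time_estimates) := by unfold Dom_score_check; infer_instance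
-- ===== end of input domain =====

-- B replaces A's threaded (penalty, time_remain, current_time) loop by staged passes: a
-- prefix-sum list, a count of fitting prefixes, and a closed penalty formula (alternative).
-- Both Pythons mutate time_estimates identically (pop + sort); the equivalence proved here is
-- about the RETURN value.

-- ===== PORT A =====
def score_check_LIMIT : Int := 300

-- one loop step of A: state (Num_AC, Penalty_Time, time_remain, current_time)
def scAStep (acc : Int × Int × Int × Int) (t : Int) : Int × Int × Int × Int :=
  if t ≤ acc.2.2.1 then (acc.1 + 1, acc.2.1 + acc.2.2.2 + t, acc.2.2.1 - t, acc.2.2.2 + t)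
  else acc

def score_check (num_probs : Int) (first_solve : Int) (time_estimates : List Int) : Int × Int :=
  match PySem.List.pyGet? time_estimates first_solve with
  | none => (0, 0)   -- IndexError in Python; excluded by Pre_score_check
  | some t0 =>
    if t0 > score_check_LIMIT then (0, 0)
    else
      let rest := match PySem.List.pop? time_estimates first_solve with
                  | some r => r.2
                  | none => []
      let sortedRest := PySem.List.sorted rest (fun x => x) false
      let st := sortedRest.foldl scAStep (1, t0, 300 - t0, t0)
      (st.1, st.2.1)

-- ===== PORT B =====
-- B's first pass: the running prefix sums of the list, starting from s
def scPrefixes (s : Int) : List Int → List Int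
  | [] => []
  | t :: ts => (s + t) :: scPrefixes (s + t) ts

def score_check_alt (num_probs : Int) (first_solve : Int) (time_estimates : List Int) : Int × Int :=
  match PySem.List.pyGet? time_estimates first_solve with
  | none => (0, 0)   -- IndexError in Python; excluded by Pre_score_check
  | some t0 =>
    if t0 > score_check_LIMIT then (0, 0)
    else
      let rest := match PySem.List.pop? time_estimates first_solve with
                  | some r => r.2
                  | none => []
      let sortedRest := PySem.List.sorted rest (fun x => x) false
      let rem := 300 - t0
      let prefixes := scPrefixes 0 sortedRest
      let k := (prefixes.filter (fun p => decide (p ≤ rem))).length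
      ((k : Int) + 1, t0 * ((k : Int) + 1) + (prefixes.take k).sum)

-- ===== PRECONDITION & SPEC =====
-- Pre_ excludes exactly the inputs where Python A raises IndexError on time_estimates[first_solve].
def Pre_score_check (num_probs : Int) (first_solve : Int) (time_estimates : List Int) : Prop :=
  PySem.Raise.InRange time_estimates.length first_solve
instance (num_probs : Int) (first_solve : Int) (time_estimates : List Int) : Decidable (Pre_score_check num_probs first_solve time_estimates) := by unfold Pre_score_check; infer_instance

def pvWitness_score_check : Int × Int × List Int := (3, 1, [100, 50, 200])

def Spec_score_check (num_probs : Int) (first_solve : Int) (time_estimates : List Int) (out : Int × Int) : Prop := out = score_check_alt num_probs first_solve time_estimates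
instance (num_probs : Int) (first_solve : Int) (time_estimates : List Int) (out : Int × Int) : Decidable (Spec_score_check num_probs first_solve time_estimates out) := by unfold Spec_score_check; infer_instance

-- ===== CLAIM (what is proved, stated in full; the proofs are below) =====
def Claim_equal_score_check : Prop := ∀ (num_probs : Int) (first_solve : Int) (time_estimates : List Int), Dom_score_check num_probs first_solve time_estimates → Pre_score_check num_probs first_solve time_estimates → Spec_score_check num_probs first_solve time_estimates (score_check num_probs first_solve time_estimates)

-- ===== LEMMAS AND PROOFS =====

-- once every remaining element exceeds the remaining time, A's loop leaves the state unchanged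
lemma foldA_id : ∀ (l : List Int) (st : Int × Int × Int × Int),
    (∀ x ∈ l, st.2.2.1 < x) → l.foldl scAStep st = st := by
  intro l
  induction l with
  | nil => intro st _; rfl
  | cons t ts ih =>
    intro st h
    have ht : ¬ t ≤ st.2.2.1 := by
      have := h t (List.mem_cons_self)
      omega
    simp only [List.foldl_cons, scAStep, if_neg ht]
    exact ih st (fun x hx => h x (List.mem_cons_of_mem _ hx))

-- if every element is positive and exceeds rem - s, every prefix sum from s exceeds rem
lemma prefixes_all_gt (rem : Int) : ∀ (l : List Int) (s : Int),
    (∀ x ∈ l, 0 < x) → (∀ x ∈ l, rem - s < x) → ∀ p ∈ scPrefixes s l, rem < p := by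
  intro l
  induction l with
  | nil => intro s _ _ p hp; simp [scPrefixes] at hp
  | cons t ts ih =>
    intro s hpos hgt p hp
    have htpos : 0 < t := hpos t (List.mem_cons_self)
    have htgt : rem - s < t := hgt t (List.mem_cons_self)
    simp only [scPrefixes, List.mem_cons] at hp
    rcases hp with h | h
    · omega
    · exact ih (s + t) (fun x hx => hpos x (List.mem_cons_of_mem _ hx))
        (fun x hx => by have := hgt x (List.mem_cons_of_mem _ hx); omega) p h

-- loop correspondence on a sorted (pairwise ≤) list, with invariant s ≤ rem
lemma loop_eq (t0 rem : Int) : ∀ (l : List Int), l.Pairwise (fun a b => a ≤ b) →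
    ∀ s k sp : Int, s ≤ rem →
    ((l.foldl scAStep (k + 1, t0 * (k + 1) + sp, rem - s, t0 + s)).1,
     (l.foldl scAStep (k + 1, t0 * (k + 1) + sp, rem - s, t0 + s)).2.1)
    = (k + 1 + (((scPrefixes s l).filter (fun p => decide (p ≤ rem))).length : Int),
       t0 * (k + 1 + (((scPrefixes s l).filter (fun p => decide (p ≤ rem))).length : Int))
         + sp + ((scPrefixes s l).take ((scPrefixes s l).filter (fun p => decide (p ≤ rem))).length).sum) := by
  intro l
  induction l with
  | nil => intro _ s k sp _; simp [scPrefixes]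
  | cons t ts ih =>
    intro h s k sp hs
    by_cases hb : s + t > rem
    · -- reject: A's state is unchanged on the whole tail, B's filter is empty
      have ht : ¬ t ≤ rem - s := by omega
      have hid : ts.foldl scAStep (k + 1, t0 * (k + 1) + sp, rem - s, t0 + s)
          = (k + 1, t0 * (k + 1) + sp, rem - s, t0 + s) := by
        apply foldA_id
        intro x hx
        have hle : t ≤ x := (List.pairwise_cons.mp h).1 x hx
        simp only
        omega
      have hallgt : ∀ p ∈ scPrefixes s (t :: ts), rem < p := by
        apply prefixes_all_gt
        · intro x hx
          rcases List.mem_cons.mp hx with rfl | hx'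
          · omega
          · have := (List.pairwise_cons.mp h).1 x hx'; omega
        · intro x hx
          rcases List.mem_cons.mp hx with rfl | hx'
          · omega
          · have := (List.pairwise_cons.mp h).1 x hx'; omega
      have hfilt : (scPrefixes s (t :: ts)).filter (fun p => decide (p ≤ rem)) = [] := by
        apply List.filter_eq_nil_iff.mpr
        intro p hp
        have := hallgt p hp
        simp; omega
      simp only [List.foldl_cons, scAStep, if_neg ht, hid, hfilt, List.length_nil,
        List.take_zero, List.sum_nil]
      norm_num
    · -- accept: both advance
      have ht : t ≤ rem - s := by omega
      have hstep : scAStep (k + 1, t0 * (k + 1) + sp, rem - s, t0 + s) t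
          = ((k + 1) + 1, t0 * ((k + 1) + 1) + (sp + (s + t)), rem - (s + t), t0 + (s + t)) := by
        simp only [scAStep, if_pos ht]
        refine Prod.ext (by ring) (Prod.ext (by ring) (Prod.ext (by ring) (by ring)))
      have hkeep : decide ((s + t) ≤ rem) = true := by simp; omega
      have hpr : scPrefixes s (t :: ts) = (s + t) :: scPrefixes (s + t) ts := rfl
      have := ih (List.pairwise_cons.mp h).2 (s + t) (k + 1) (sp + (s + t)) (by omega)
      simp only [List.foldl_cons, hstep, hpr, List.filter_cons, hkeep, if_pos,
        List.length_cons, List.take_succ_cons, List.sum_cons]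
      rw [Prod.mk.injEq] at this ⊢
      constructor
      · rw [this.1]; push_cast; ring
      · rw [this.2]; push_cast; ring

-- ===== VERDICT (by name: the statement is the Claim_ definition above) =====
theorem score_check_spec : Claim_equal_score_check := by
  intro num_probs first_solve time_estimates _ _
  unfold Spec_score_check score_check score_check_alt
  cases hg : PySem.List.pyGet? time_estimates first_solve with
  | none => rfl
  | some t0 =>
    by_cases hlim : t0 > score_check_LIMIT
    · simp only [if_pos hlim]
    · simp only [if_neg hlim]
      have hpair : (PySem.List.sorted
          (match PySem.List.pop? time_estimates first_solve with
           | some r => r.2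
           | none => []) (fun x => x) false).Pairwise (fun a b => a ≤ b) := by
        have := PySem.List.sorted_pairwise
          (xs := (match PySem.List.pop? time_estimates first_solve with
                  | some r => r.2
                  | none => [])) (key := fun x : Int => x)
        simpa using this
      have h0 : (0 : Int) ≤ 300 - t0 := by
        simp [score_check_LIMIT] at hlim; omega
      have := loop_eq t0 (300 - t0)
        (PySem.List.sorted
          (match PySem.List.pop? time_estimates first_solve with
           | some r => r.2
           | none => []) (fun x => x) false) hpair 0 0 0 h0
      simpa [add_comm] using this
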